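-- pv_equiv track=rewrite | github.com/Kim-Jeong-Ju/Algorithm_Python | 027_kakao_music.py | compose
-- ===== SOURCE A (Python) =====
-- def compose(total_time, melody):
--     melody_list = [melody[0]]
--     for a in range(1, len(melody)):
--         if melody[a] != "#":        # 직전 문자 그대로인 경우
--             melody_list.append(melody[a])
--         else:                       # 직전 문자에 #이 붙는 경우
--             change = melody_list.pop().lower()
--             melody_list.append(change)
--     melody = "".join(melody_list)
--
--     if total_time < len(melody):            # 멜로디를 잘라야 함
--         result = melody[:total_time]
--     elif total_time == len(melody):         # 그대로 출력
--         result = melody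
--     else:                                   # 멜로디를 늘려야함
--         iteration = total_time // len(melody)
--         add = total_time % len(melody)
--         result = melody * iteration + melody[:add]
--
--     return result
-- ===== SOURCE B (Python) =====
-- def compose(total_time, melody):
--     out = []
--     for ch in melody:
--         if ch == "#" and out:
--             out[-1] = out[-1].lower()
--         else:
--             out.append(ch)
--     n = len(out)
--     return "".join(out[i % n] for i in range(total_time))
-- ===== Notes on version B (the rewrite author's own statement) =====
-- stated objective: simpler
-- what changed: One uniform loop lowers the previous note in place on '#' (no pop/re-append), and the three-branch truncate/exact/tile stage is replaced by a single index-modulo join over range(total_time).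
-- intended difference: For negative total_time (larger than minus the resolved melody length) A's negative slice accidentally returns a non-empty prefix of the melody, while B returns the empty string, the intended result of playing for no time. — e.g. on compose(-1, "AB"): A returns "A", B returns ""
import Mathlib
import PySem

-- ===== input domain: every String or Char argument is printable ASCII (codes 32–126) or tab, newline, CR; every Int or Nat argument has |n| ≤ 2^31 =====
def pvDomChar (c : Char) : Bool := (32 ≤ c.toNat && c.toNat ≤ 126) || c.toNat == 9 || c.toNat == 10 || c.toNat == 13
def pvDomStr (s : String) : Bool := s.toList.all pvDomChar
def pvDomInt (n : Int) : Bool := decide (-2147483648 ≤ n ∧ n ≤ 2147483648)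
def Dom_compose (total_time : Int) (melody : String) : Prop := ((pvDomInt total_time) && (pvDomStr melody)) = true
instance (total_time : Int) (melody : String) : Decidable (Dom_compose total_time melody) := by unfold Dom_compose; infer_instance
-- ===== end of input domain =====

-- B replaces A's pop/lower/re-append parse step by an in-place lowering of the last note, and A's
-- three-branch truncate/exact-fit/tile stage by a single index-modulo join over range(total_time).

-- ===== PORT A =====
def compose (total_time : Int) (melody : String) : String :=
  match melody.toList with
  | [] => ""   -- Python: melody[0] raises IndexError here; excluded by Pre_compose
  | c0 :: _ =>
    let m := melody.toList
    let ml := (PySem.List.pyRange 1 (PySem.List.len m) 1).foldl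
      (fun acc a =>
        (fun acc (ch : Char) =>
          if ch ≠ '#' then acc ++ [ch]
          else
            match acc.getLast? with
            | none => acc          -- pop() on []: unreachable, the accumulator starts non-empty
            | some c => acc.dropLast ++ PySem.Chars.lower [c]) acc (PySem.List.pyGetD m a ' '))
      [c0]
    let L := PySem.List.len ml
    if total_time < L then
      String.ofList (PySem.List.slice ml none (some total_time))
    else if total_time = L then
      String.ofList ml
    else
      let iteration := PySem.Int.floordiv total_time L
      let add := PySem.Int.mod total_time L
      String.ofList (PySem.List.pyRepeat ml iteration ++ PySem.List.slice ml none (some add))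

-- ===== PORT B =====
def compose_alt (total_time : Int) (melody : String) : String :=
  let out := melody.toList.foldl
    (fun acc ch =>
      if ch = '#' ∧ acc ≠ [] then
        PySem.List.pySetD acc (-1) (PySem.Chars.lowerChar (PySem.List.pyGetD acc (-1) ch))
      else acc ++ [ch])
    []
  let n := PySem.List.len out
  String.ofList ((PySem.List.pyRange 0 total_time 1).map
    (fun i => PySem.List.pyGetD out (PySem.Int.mod i n) ' '))

-- ===== PRECONDITION & SPEC =====
-- Pre_ excludes only the empty melody, on which the Python A raises IndexError at melody[0].
def Pre_compose (total_time : Int) (melody : String) : Prop := melody ≠ ""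
instance (total_time : Int) (melody : String) : Decidable (Pre_compose total_time melody) := by
  unfold Pre_compose; infer_instance
def pvWitness_compose : Int × String := (7, "CC#BCC#BC")

-- For negative total_time greater than minus the resolved melody length, A's negative slice
-- accidentally returns a non-empty prefix of the melody, while B returns "", the intended
-- result of playing for no time.
def D_compose (total_time : Int) (melody : String) : Prop :=
  melody ≠ "" ∧ total_time < 0 ∧
    -((melody.toList.length : Int) - (melody.toList.tail.count '#' : Int)) < total_time
instance (total_time : Int) (melody : String) : Decidable (D_compose total_time melody) := by
  unfold D_compose; infer_instance

def Spec_compose (total_time : Int) (melody : String) (out : String) : Prop :=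
  ¬ D_compose total_time melody → out = compose_alt total_time melody
instance (total_time : Int) (melody : String) (out : String) : Decidable (Spec_compose total_time melody out) := by
  unfold Spec_compose; infer_instance

def pvDiffWitness_compose : Int × String := (-1, "AB")
def pvDiffWitnessOut_compose : String × String := ("A", "")

-- ===== CLAIM (what is proved, stated in full; the proofs are below) =====
def Claim_unchanged_compose : Prop := ∀ (total_time : Int) (melody : String), Dom_compose total_time melody → Pre_compose total_time melody → Spec_compose total_time melody (compose total_time melody)
def Claim_changed_compose : Prop := Dom_compose (pvDiffWitness_compose.1) (pvDiffWitness_compose.2) ∧ Pre_compose (pvDiffWitness_compose.1) (pvDiffWitness_compose.2) ∧ D_compose (pvDiffWitness_compose.1) (pvDiffWitness_compose.2) ∧ compose (pvDiffWitness_compose.1) (pvDiffWitness_compose.2) = pvDiffWitnessOut_compose.1 ∧ compose_alt (pvDiffWitness_compose.1) (pvDiffWitness_compose.2) = pvDiffWitnessOut_compose.2 ∧ pvDiffWitnessOut_compose.1 ≠ pvDiffWitnessOut_compose.2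
def Claim_exact_compose : Prop := ∀ (total_time : Int) (melody : String), Dom_compose total_time melody → Pre_compose total_time melody → D_compose total_time melody → compose total_time melody ≠ compose_alt total_time melody

-- ===== LEMMAS AND PROOFS =====

-- A's loop body (once the indexing is resolved) and B's loop body, as named step functions.
def pvStepA (acc : List Char) (ch : Char) : List Char :=
  if ch ≠ '#' then acc ++ [ch]
  else
    match acc.getLast? with
    | none => acc
    | some c => acc.dropLast ++ PySem.Chars.lower [c]

def pvStepB (acc : List Char) (ch : Char) : List Char :=
  if ch = '#' ∧ acc ≠ [] then
    PySem.List.pySetD acc (-1) (PySem.Chars.lowerChar (PySem.List.pyGetD acc (-1) ch))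
  else acc ++ [ch]

theorem pvStepA_eq_pvStepB (acc : List Char) (ch : Char) (h : acc ≠ []) :
    pvStepA acc ch = pvStepB acc ch := by
  rcases List.eq_nil_or_concat acc with rfl | ⟨as, a, rfl⟩
  · exact absurd rfl h
  · by_cases hch : ch = '#'
    · subst hch
      simp [pvStepA, pvStepB, PySem.Chars.lower, PySem.List.pySetD, PySem.List.pySet?,
        PySem.List.pyIdx?, PySem.List.pyGetD_neg_one_append_singleton]
    · simp [pvStepA, pvStepB, hch]

theorem pvStepA_ne_nil (acc : List Char) (ch : Char) (h : acc ≠ []) : pvStepA acc ch ≠ [] := by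
  rcases List.eq_nil_or_concat acc with rfl | ⟨as, a, rfl⟩
  · exact absurd rfl h
  · by_cases hch : ch = '#' <;> simp [pvStepA, hch, PySem.Chars.lower]

theorem pvFoldA_eq_foldB (l : List Char) (acc : List Char) (h : acc ≠ []) :
    l.foldl pvStepA acc = l.foldl pvStepB acc := by
  induction l generalizing acc with
  | nil => rfl
  | cons x xs ih =>
    simp only [List.foldl_cons, pvStepA_eq_pvStepB acc x h]
    rw [← pvStepA_eq_pvStepB acc x h]
    exact ih _ (pvStepA_ne_nil acc x h)

theorem pvFoldA_ne_nil (l : List Char) (acc : List Char) (h : acc ≠ []) :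
    l.foldl pvStepA acc ≠ [] := by
  induction l generalizing acc with
  | nil => exact h
  | cons x xs ih => exact ih _ (pvStepA_ne_nil acc x h)

theorem pvFoldA_length (l : List Char) (acc : List Char) (h : acc ≠ []) :
    (l.foldl pvStepA acc).length + l.count '#' = acc.length + l.length := by
  induction l generalizing acc with
  | nil => simp
  | cons x xs ih =>
    have h2 := ih (pvStepA acc x) (pvStepA_ne_nil acc x h)
    have hlen : (pvStepA acc x).length + (if x = '#' then 1 else 0) = acc.length + 1 := by
      rcases List.eq_nil_or_concat acc with rfl | ⟨as, a, rfl⟩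
      · exact absurd rfl h
      · by_cases hch : x = '#' <;> simp [pvStepA, hch, PySem.Chars.lower]
    simp only [List.foldl_cons, List.count_cons, List.length_cons]
    by_cases hch : x = '#' <;> simp [hch] at hlen h2 ⊢ <;> omega

-- the range-N index-modulo read of r, at the Nat level
theorem pvTake (r : List Char) (N : Nat) (hN : N ≤ r.length) :
    (List.range N).map (fun k => r.getD (k % r.length) ' ') = r.take N := by
  induction N with
  | zero => simp
  | succ n ih =>
    rw [List.range_succ, List.map_append, ih (by omega)]
    have hn : n < r.length := by omega
    rw [List.take_add_one]
    simp only [List.map_cons, List.map_nil, Nat.mod_eq_of_lt hn,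
      List.getD_eq_getElem r ' ' hn, List.getElem?_eq_getElem hn, Option.toList_some]

theorem pvModJoin (r : List Char) (hr : r ≠ []) (N : Nat) :
    (List.range N).map (fun k => r.getD (k % r.length) ' ')
      = (List.replicate (N / r.length) r).flatten ++ r.take (N % r.length) := by
  have hL : 0 < r.length := List.length_pos_iff.mpr hr
  induction N using Nat.strong_induction_on with
  | _ N ih =>
    by_cases hsmall : N < r.length
    · rw [pvTake r N (by omega), Nat.div_eq_of_lt hsmall, Nat.mod_eq_of_lt hsmall]; simp
    · obtain ⟨M, rfl⟩ : ∃ M, N = r.length + M := ⟨N - r.length, by omega⟩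
      rw [List.range_add, List.map_append, pvTake r r.length le_rfl, List.take_length]
      have hmap : ((List.range M).map (fun k => r.length + k)).map
            (fun k => r.getD (k % r.length) ' ')
          = (List.range M).map (fun k => r.getD (k % r.length) ' ') := by
        rw [List.map_map]; exact List.map_congr_left (fun k _ => by simp [Nat.add_mod_left])
      rw [hmap, ih M (by omega), Nat.add_div_left _ hL, Nat.add_mod_left]
      simp [List.replicate_succ]

-- A's whole computation, as the three-way branch over r = foldl pvStepA [c0] rest
theorem compose_eval (t : Int) (melody : String) (c0 : Char) (rest : List Char)
    (hm : melody.toList = c0 :: rest) :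
    compose t melody = String.ofList
      (if t < PySem.List.len (rest.foldl pvStepA [c0]) then
        PySem.List.slice (rest.foldl pvStepA [c0]) none (some t)
       else if t = PySem.List.len (rest.foldl pvStepA [c0]) then rest.foldl pvStepA [c0]
       else PySem.List.pyRepeat (rest.foldl pvStepA [c0])
              (PySem.Int.floordiv t (PySem.List.len (rest.foldl pvStepA [c0])))
            ++ PySem.List.slice (rest.foldl pvStepA [c0]) none
              (some (PySem.Int.mod t (PySem.List.len (rest.foldl pvStepA [c0]))))) := by
  have hfold := PySem.List.foldl_pyRange_pyGetD (xs := melody.toList) (a := 1) (d := ' ')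
    (f := (fun acc (ch : Char) =>
          if ch ≠ '#' then acc ++ [ch]
          else
            match acc.getLast? with
            | none => acc
            | some c => acc.dropLast ++ PySem.Chars.lower [c])) (init := [c0]) (by omega)
  rw [hm] at hfold
  rw [show (1:Int).toNat = 1 from rfl] at hfold
  simp only [List.drop_one, List.tail_cons] at hfold
  have hraw : List.foldl (fun acc (ch : Char) =>
          if ch ≠ '#' then acc ++ [ch]
          else
            match acc.getLast? with
            | none => acc
            | some c => acc.dropLast ++ PySem.Chars.lower [c]) [c0] rest
      = rest.foldl pvStepA [c0] := rfl
  simp only [compose, hm]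
  rw [show PySem.List.len (c0 :: rest) = PySem.List.len (melody.toList) by rw [hm], hm] at hfold
  rw [hfold, hraw]
  split_ifs <;> rfl

-- B's whole computation, over the same fold (pvStepB)
theorem compose_alt_eval (t : Int) (melody : String) :
    compose_alt t melody = String.ofList ((PySem.List.pyRange 0 t 1).map
      (fun i => PySem.List.pyGetD (melody.toList.foldl pvStepB [])
        (PySem.Int.mod i (PySem.List.len (melody.toList.foldl pvStepB []))) ' ')) := rfl

-- A's branch result equals B's index-modulo read, outside D_
theorem pvOut (r : List Char) (hr : r ≠ []) (t : Int) (hnd : 0 ≤ t ∨ t ≤ -(r.length:Int)) :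
    (if t < PySem.List.len r then PySem.List.slice r none (some t)
     else if t = PySem.List.len r then r
     else PySem.List.pyRepeat r (PySem.Int.floordiv t (PySem.List.len r)) ++
       PySem.List.slice r none (some (PySem.Int.mod t (PySem.List.len r))))
    = (PySem.List.pyRange 0 t 1).map
        (fun i => PySem.List.pyGetD r (PySem.Int.mod i (PySem.List.len r)) ' ') := by
  have hL : 0 < r.length := List.length_pos_iff.mpr hr
  have hrhs : (PySem.List.pyRange 0 t 1).map
        (fun i => PySem.List.pyGetD r (PySem.Int.mod i (PySem.List.len r)) ' ')
      = (List.replicate (t.toNat / r.length) r).flatten ++ r.take (t.toNat % r.length) := by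
    rw [PySem.List.pyRange_zero, List.map_map, ← pvModJoin r hr t.toNat]
    refine List.map_congr_left (fun k _ => ?_)
    simp only [Function.comp_apply, PySem.List.len_eq, PySem.Int.mod_natCast,
      PySem.List.pyGetD_natCast]
  rw [hrhs]
  simp only [PySem.List.len_eq]
  rcases hnd with hpos | hneg
  · rcases lt_trichotomy t (r.length : Int) with hlt | heq | hgt
    · rw [if_pos hlt, PySem.List.slice_to r hpos]
      have h1 : t.toNat < r.length := by omega
      rw [Nat.div_eq_of_lt h1, Nat.mod_eq_of_lt h1]; simp
    · rw [if_neg (by omega), if_pos heq]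
      have h1 : t.toNat = r.length := by omega
      rw [h1, Nat.div_self hL, Nat.mod_self]
      simp
    · rw [if_neg (by omega), if_neg (by omega)]
      have ht : t = ((t.toNat : Nat) : Int) := by omega
      rw [ht, PySem.Int.floordiv_natCast, PySem.Int.mod_natCast,
        PySem.List.slice_to r (by positivity)]
      have hrep : PySem.List.pyRepeat r (((t.toNat / r.length : Nat)) : Int)
          = (List.replicate (t.toNat / r.length) r).flatten := by
        unfold PySem.List.pyRepeat; rw [Int.toNat_natCast]
      rw [hrep, show ((t.toNat % r.length : Nat) : Int).toNat = t.toNat % r.length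
        from Int.toNat_natCast _, Int.toNat_natCast]
  · have hlt : t < (r.length : Int) := by omega
    rw [if_pos hlt]
    have h0 : t.toNat = 0 := by omega
    rw [h0]
    simp only [Nat.zero_div, Nat.zero_mod, List.replicate_zero, List.flatten_nil, List.take_zero,
      List.nil_append]
    have ht : t = -(((-t).toNat : Nat) : Int) := by omega
    rw [ht, PySem.List.slice_to_neg_natCast r _ (by omega)]
    rw [show r.length - (-t).toNat = 0 from by omega, List.take_zero]

-- ===== VERDICT (by name: the statement is the Claim_ definition above) =====
theorem compose_spec : Claim_unchanged_compose := by
  intro t melody hdom hpre hnd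
  have hml : melody.toList ≠ [] := fun h => hpre (String.toList_eq_nil_iff.mp h)
  obtain ⟨c0, rest, hm⟩ : ∃ c0 rest, melody.toList = c0 :: rest := by
    cases h : melody.toList with
    | nil => exact absurd h hml
    | cons a l => exact ⟨a, l, rfl⟩
  have hr : rest.foldl pvStepA [c0] ≠ [] := pvFoldA_ne_nil rest [c0] (by simp)
  have hlen : (rest.foldl pvStepA [c0]).length + rest.count '#' = 1 + rest.length :=
    pvFoldA_length rest [c0] (by simp)
  have hcount : rest.count '#' ≤ rest.length := List.count_le_length
  have hB : melody.toList.foldl pvStepB [] = rest.foldl pvStepA [c0] := by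
    rw [hm, List.foldl_cons, show pvStepB [] c0 = [c0] from by simp [pvStepB],
      ← pvFoldA_eq_foldB rest [c0] (by simp)]
  have hnd' : 0 ≤ t ∨ t ≤ -(((rest.foldl pvStepA [c0]).length : Nat) : Int) := by
    by_cases h0 : 0 ≤ t
    · exact Or.inl h0
    · right
      by_contra hgt
      exact hnd ⟨hpre, by omega, by
        rw [hm]; simp only [List.length_cons, List.tail_cons]; push_cast; omega⟩
  rw [compose_eval t melody c0 rest hm, compose_alt_eval, hB]
  exact congrArg String.ofList (pvOut _ hr t hnd')

theorem compose_changed : Claim_changed_compose := by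
  unfold Claim_changed_compose; decide

theorem compose_tight : Claim_exact_compose := by
  intro t melody hdom hpre hd
  obtain ⟨hne, htneg, hgt⟩ := hd
  have hml : melody.toList ≠ [] := fun h => hne (String.toList_eq_nil_iff.mp h)
  obtain ⟨c0, rest, hm⟩ : ∃ c0 rest, melody.toList = c0 :: rest := by
    cases h : melody.toList with
    | nil => exact absurd h hml
    | cons a l => exact ⟨a, l, rfl⟩
  have hr : rest.foldl pvStepA [c0] ≠ [] := pvFoldA_ne_nil rest [c0] (by simp)
  have hlen : (rest.foldl pvStepA [c0]).length + rest.count '#' = 1 + rest.length :=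
    pvFoldA_length rest [c0] (by simp)
  have hgt' : -(((rest.foldl pvStepA [c0]).length : Nat) : Int) < t := by
    rw [hm] at hgt; simp only [List.length_cons, List.tail_cons] at hgt; push_cast at hgt ⊢; omega
  have hA : compose t melody
      = String.ofList (List.take ((rest.foldl pvStepA [c0]).length - (-t).toNat)
          (rest.foldl pvStepA [c0])) := by
    rw [compose_eval t melody c0 rest hm,
      if_pos (show t < PySem.List.len (rest.foldl pvStepA [c0]) by
        rw [PySem.List.len_eq]; omega)]
    rw [show t = -(((-t).toNat : Nat) : Int) from by omega,
      PySem.List.slice_to_neg_natCast _ _ (by omega), neg_neg, Int.toNat_natCast]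
  have hBnil : compose_alt t melody = String.ofList [] := by
    rw [compose_alt_eval, PySem.List.pyRange_one_eq_nil (by omega), List.map_nil]
  rw [hA, hBnil]
  intro heq
  have h2 := congrArg String.toList heq
  rw [String.toList_ofList, String.toList_ofList] at h2
  have h3 := congrArg List.length h2
  rw [List.length_take, List.length_nil] at h3
  omega
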